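-- pv_equiv track=rewrite | github.com/ferhatelmas/algo | codeEval/medium/black_or_white.py | solve
-- ===== SOURCE A (Python) =====
-- def count(ls, l, r, c):
--     return sum(ls[i][c : c + l].count("1") for i in range(r, r + l))
--
-- def solve(ls):
--     l = len(ls)
--     for i in range(1, l + 1):
--         c, n = set(), 0
--         for j in range(l - i + 1):
--             for k in range(l - i + 1):
--                 n += 1
--                 c.add(count(ls, i, j, k))
--         if len(c) == 1:
--             return "{0}x{0}, {1}".format(i, c.pop())
-- ===== SOURCE B (Python) =====
-- def solve(ls):
--     l = len(ls)
--     # 2D prefix sums: pref[a][b] = number of '1' in the first b columns of the first a rows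
--     prev = [0] * (l + 1)
--     pref = [prev]
--     for row in ls:
--         bits = [(1 if ch == "1" else 0) for ch in row[:l]]
--         bits += [0] * (l - len(bits))
--         cur, run = [0], 0
--         for b in bits:
--             run += b
--             cur.append(run)
--         prev = [p + q for p, q in zip(prev, cur)]
--         pref.append(prev)
--     for i in range(1, l + 1):
--         target = pref[i][i] - pref[0][i] - pref[i][0] + pref[0][0]
--         ok = all(
--             pref[r + i][c + i] - pref[r][c + i] - pref[r + i][c] + pref[r][c] == target
--             for r in range(l - i + 1)
--             for c in range(l - i + 1)
--         )
--         if ok: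
--             return "{0}x{0}, {1}".format(i, target)
-- ===== Notes on version B (the rewrite author's own statement) =====
-- stated objective: faster
-- what changed: Replaces the recount of every i-by-i block from the raw strings (an O(i^2) scan per block, repeated for every block and size, plus a set to detect equality) with one 2D prefix-sum table built once, O(1) block sums, and a short-circuiting all() against the first block's count.
import Mathlib
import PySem

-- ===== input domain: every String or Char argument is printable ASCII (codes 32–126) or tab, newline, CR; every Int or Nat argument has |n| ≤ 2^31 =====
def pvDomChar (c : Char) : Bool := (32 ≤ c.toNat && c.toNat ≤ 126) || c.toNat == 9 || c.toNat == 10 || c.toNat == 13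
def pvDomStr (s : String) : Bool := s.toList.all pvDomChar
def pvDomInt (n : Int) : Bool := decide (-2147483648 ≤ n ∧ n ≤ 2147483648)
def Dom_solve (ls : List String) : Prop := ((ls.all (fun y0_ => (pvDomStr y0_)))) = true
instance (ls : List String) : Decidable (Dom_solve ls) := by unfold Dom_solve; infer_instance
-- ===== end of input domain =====

-- B replaces A's per-block recount of the grid with one 2D prefix-sum table and O(1) block sums (objective: faster).

-- ===== PORT A =====
-- sum(ls[i][c : c + l].count("1") for i in range(r, r + l))
def countA (ls : List String) (l r c : Int) : Int :=
  ((PySem.List.pyRange r (r + l) 1).map (fun i =>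
      (PySem.Str.count
        (PySem.Str.slice (PySem.List.pyGetD ls i "") (some c) (some (c + l))) "1" : Int))).sum

def solve (ls : List String) : Option String :=
  let l : Int := (ls.length : Int)
  (PySem.List.pyRange 1 (l + 1) 1).findSome? (fun i =>
    let cn : PySem.Set Int × Int :=
      (PySem.List.pyRange 0 (l - i + 1) 1).foldl (fun s j =>
        (PySem.List.pyRange 0 (l - i + 1) 1).foldl (fun s k =>
          (PySem.Set.add s.1 (countA ls i j k), s.2 + 1)) s) (PySem.Set.empty, 0)
    -- c.pop() on the singleton set is its unique element, ported as the set's first element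
    if PySem.Set.len cn.1 = 1 then
      some (PySem.Int.toStr i ++ "x" ++ PySem.Int.toStr i ++ ", " ++
            PySem.Int.toStr (PySem.List.pyGetD cn.1 0 0))
    else none)

-- ===== PORT B =====
-- bits = [(1 if ch == "1" else 0) for ch in row[:l]]; bits += [0] * (l - len(bits))
def bitsOf (l : Nat) (row : String) : List Int :=
  let b := (PySem.Str.slice row none (some (l : Int))).toList.map
      (fun ch => if ch == '1' then (1 : Int) else 0)
  b ++ List.replicate (l - b.length) 0

-- cur, run = [0], 0; for b in bits: run += b; cur.append(run)
def rowCur (l : Nat) (row : String) : List Int :=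
  ((bitsOf l row).foldl (fun s b => (s.1 ++ [s.2 + b], s.2 + b)) ([0], 0)).1

-- pref[r+i][c+i] - pref[r][c+i] - pref[r+i][c] + pref[r][c]
def blockB (pref : List (List Int)) (r c i : Int) : Int :=
  PySem.List.pyGetD (PySem.List.pyGetD pref (r + i) []) (c + i) 0
  - PySem.List.pyGetD (PySem.List.pyGetD pref r []) (c + i) 0
  - PySem.List.pyGetD (PySem.List.pyGetD pref (r + i) []) c 0
  + PySem.List.pyGetD (PySem.List.pyGetD pref r []) c 0

def solve_alt (ls : List String) : Option String :=
  let l : Nat := ls.length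
  let pp : List Int × List (List Int) :=
    ls.foldl (fun s row =>
      let nw := List.zipWith (· + ·) s.1 (rowCur l row)
      (nw, s.2 ++ [nw])) (List.replicate (l + 1) 0, [List.replicate (l + 1) 0])
  (PySem.List.pyRange 1 ((l : Int) + 1) 1).findSome? (fun i =>
    let target := blockB pp.2 0 0 i
    if (PySem.List.pyRange 0 ((l : Int) - i + 1) 1).all (fun r =>
        (PySem.List.pyRange 0 ((l : Int) - i + 1) 1).all (fun c =>
          blockB pp.2 r c i == target)) then
      some (PySem.Int.toStr i ++ "x" ++ PySem.Int.toStr i ++ ", " ++ PySem.Int.toStr target)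
    else none)

-- ===== PRECONDITION & SPEC =====
def Spec_solve (ls : List String) (out : Option String) : Prop := out = solve_alt ls
instance (ls : List String) (out : Option String) : Decidable (Spec_solve ls out) := by unfold Spec_solve; infer_instance

-- ===== CLAIM (what is proved, stated in full; the proofs are below) =====
def Claim_equal_solve : Prop := ∀ (ls : List String), Dom_solve ls → Spec_solve ls (solve ls)

-- ===== LEMMAS AND PROOFS =====

-- count of '1' in row.toList.take b  (row prefix sums, the mathematical reading of both programs)
def rpF (row : String) (b : Nat) : Int := ((row.toList.take b).count '1' : Int)

-- raw prefix sum as B computes it (bits are clamped/padded to width l)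
def rpRaw (l : Nat) (row : String) (b : Nat) : Int := ((bitsOf l row).take b).sum

-- 2D prefix table value: rows before a, columns before b
def PmRaw (l : Nat) (rows : List String) (a b : Nat) : Int :=
  ∑ t ∈ Finset.range a, rpRaw l (rows.getD t "") b

-- the count of '1' in the i×i block at (r, c)
def vv (ls : List String) (i r c : Nat) : Int :=
  ∑ t ∈ Finset.range i, (rpF (ls.getD (r + t) "") (c + i) - rpF (ls.getD (r + t) "") c)

lemma count_go_singleton (c : Char) : ∀ (s : List Char) (fuel acc : Nat), s.length ≤ fuel →
    PySem.Chars.count.go [c] fuel s acc = acc + s.count c := by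
  intro s
  induction s with
  | nil => intro fuel acc h; cases fuel <;> simp [PySem.Chars.count.go]
  | cons h t ih =>
    intro fuel acc hf
    cases fuel with
    | zero => simp at hf
    | succ f =>
      simp only [PySem.Chars.count.go]
      by_cases hc : c = h
      · subst hc
        have h1 : ([c].isPrefixOf (c :: t)) = true := by simp [List.isPrefixOf]
        rw [h1]
        simp only [if_true, List.length_cons, List.length_nil, List.drop_succ_cons, List.drop_zero]
        rw [ih f (acc + 1) (by simpa using hf)]
        simp
        omega
      · have h1 : ([c].isPrefixOf (h :: t)) = false := by
          simp [List.isPrefixOf, hc]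
        rw [h1]
        simp only [Bool.false_eq_true, if_false]
        rw [ih f acc (by simpa using hf)]
        simp only [List.count_cons]
        have : (h == c) = false := by simp; exact fun hh => (hc hh.symm)
        simp [this]

lemma count_singleton (s : List Char) (c : Char) : PySem.Chars.count s [c] = s.count c := by
  simp [PySem.Chars.count, count_go_singleton c s s.length 0 le_rfl]

lemma bitsOf_toList (l : Nat) (row : String) :
    bitsOf l row = (row.toList.take l).map (fun ch => if ch == '1' then (1:Int) else 0)
      ++ List.replicate (l - min l row.length) 0 := by
  simp [bitsOf, PySem.Str.toList_slice, PySem.List.slice_to_natCast]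

lemma len_toList (row : String) : row.toList.length = row.length := by
  simp

lemma bitsOf_length (l : Nat) (row : String) : (bitsOf l row).length = l := by
  rw [bitsOf_toList]; simp

lemma sum_map_bit (u : List Char) :
    (u.map (fun ch => if ch == '1' then (1:Int) else 0)).sum = (u.count '1' : Int) := by
  rw [PySem.List.sum_map_ite_one_zero]
  congr 1

lemma rpRaw_eq_rpF (l : Nat) (row : String) (b : Nat) (hb : b ≤ l) :
    rpRaw l row b = rpF row b := by
  unfold rpRaw rpF
  rw [bitsOf_toList]
  rcases le_or_gt b ((row.toList.take l).length) with h | h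
  · rw [List.take_append_of_le_length (by simpa using h), ← List.map_take, List.take_take,
      min_eq_left hb, sum_map_bit]
  · have hlen : (row.toList.take l).length = min l row.length := by simp
    have hrow : row.length < b := by rw [hlen] at h; omega
    rw [List.take_append, List.sum_append, ← List.map_take,
        List.take_of_length_le (show (List.take l row.toList).length ≤ b by rw [hlen]; omega),
        List.take_of_length_le (show row.toList.length ≤ l by rw [len_toList]; omega),
        sum_map_bit, List.take_replicate, List.sum_replicate,
        List.take_of_length_le (show row.toList.length ≤ b by rw [len_toList]; omega)]
    simp

lemma cell_eq (row : String) (c i : Nat) :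
    ((PySem.Str.count (PySem.Str.slice row (some (c:Int)) ((c:Int) + (i:Int))) "1" : Int))
    = rpF row (c + i) - rpF row c := by
  rw [PySem.Str.count_eq]
  have h1 : (PySem.Str.slice row (some (c:Int)) (some ((c:Int) + (i:Int)))).toList
      = (row.toList.drop c).take i := by
    rw [PySem.Str.toList_slice]
    exact PySem.List.slice_natCast_add row.toList c i
  rw [h1]
  have h2 : ("1" : String).toList = ['1'] := by decide
  rw [h2, count_singleton]
  unfold rpF
  have h3 : row.toList.take (c + i) = row.toList.take c ++ (row.toList.drop c).take i :=
    List.take_add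
  rw [h3, List.count_append]
  push_cast
  ring

lemma countA_eq (ls : List String) (i r c : Nat) :
    countA ls (i : Int) (r : Int) (c : Int) = vv ls i r c := by
  unfold countA vv
  rw [PySem.List.pyRange_one]
  have hlen : (((r:Int) + i - r)).toNat = i := by omega
  rw [hlen, List.map_map]
  have hr : ∑ t ∈ Finset.range i, (rpF (ls.getD (r + t) "") (c + i) - rpF (ls.getD (r + t) "") c)
      = ((List.range i).map (fun t => rpF (ls.getD (r + t) "") (c + i) - rpF (ls.getD (r + t) "") c)).sum := by
    rfl
  rw [hr]
  apply congrArg List.sum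
  apply List.map_congr_left
  intro t ht
  simp only [Function.comp_apply]
  have hcast : (r:Int) + (t:Int) = ((r + t : Nat) : Int) := by push_cast; ring
  rw [hcast, PySem.List.pyGetD_natCast]
  exact cell_eq (ls.getD (r+t) "") c i

lemma curloop (bits : List Int) :
    ∀ (acc : List Int) (run : Int),
    bits.foldl (fun s b => (s.1 ++ [s.2 + b], s.2 + b)) (acc, run)
    = (acc ++ (List.range bits.length).map (fun b => run + (bits.take (b+1)).sum),
       run + bits.sum) := by
  induction bits with
  | nil => intro acc run; simp
  | cons x t ih =>
    intro acc run
    simp only [List.foldl_cons]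
    rw [ih (acc ++ [run + x]) (run + x)]
    refine Prod.ext ?_ (by simp [add_assoc])
    simp [List.range_succ_eq_map, List.map_map, Function.comp_def, List.take_succ_cons, add_assoc]

lemma rowCur_eq (l : Nat) (row : String) :
    rowCur l row = (List.range (l + 1)).map (fun b => rpRaw l row b) := by
  unfold rowCur rpRaw
  rw [curloop, bitsOf_length]
  have : (List.range (l+1)).map (fun b => ((bitsOf l row).take b).sum)
      = 0 :: (List.range l).map (fun b => ((bitsOf l row).take (b+1)).sum) := by
    rw [List.range_succ_eq_map]
    simp [List.map_map, Function.comp_def]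
  rw [this]
  simp

lemma zipWith_map_same {α β : Type} [Add β] (f g : α → β) (r : List α) :
    List.zipWith (· + ·) (r.map f) (r.map g) = r.map (fun x => f x + g x) := by
  rw [List.zipWith_map]
  induction r with
  | nil => rfl
  | cons a t _ => simp

lemma PmRaw_append (l : Nat) (rows : List String) (row : String) (a b : Nat)
    (ha : a ≤ rows.length) :
    PmRaw l (rows ++ [row]) a b = PmRaw l rows a b := by
  unfold PmRaw
  apply Finset.sum_congr rfl
  intro t ht
  exact congrArg (fun s => rpRaw l s b)
    (List.getD_append rows [row] "" t (lt_of_lt_of_le (Finset.mem_range.mp ht) ha))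

set_option maxHeartbeats 1000000 in
lemma pref_eq (l : Nat) (rows : List String) :
    rows.foldl (fun s row =>
      let nw := List.zipWith (· + ·) s.1 (rowCur l row)
      (nw, s.2 ++ [nw])) (List.replicate (l + 1) 0, [List.replicate (l + 1) 0])
    = ((List.range (l + 1)).map (fun b => PmRaw l rows rows.length b),
       (List.range (rows.length + 1)).map (fun a =>
         (List.range (l + 1)).map (fun b => PmRaw l rows a b))) := by
  induction rows using List.reverseRecOn with
  | nil =>
    simp [PmRaw]
  | append_singleton rows row ih =>
    rw [List.foldl_append, ih]
    simp only [List.foldl_cons, List.foldl_nil]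
    have hrow : (rows ++ [row]).getD rows.length "" = row := by
      rw [List.getD_eq_getElem?_getD]
      simp
    have hnew : List.zipWith (· + ·)
        ((List.range (l+1)).map (fun b => PmRaw l rows rows.length b)) (rowCur l row)
        = (List.range (l+1)).map (fun b => PmRaw l (rows ++ [row]) (rows.length + 1) b) := by
      rw [rowCur_eq, zipWith_map_same]
      apply List.map_congr_left
      intro b _
      unfold PmRaw
      rw [Finset.sum_range_succ, hrow]
      congr 1
      exact Finset.sum_congr rfl (fun t ht => congrArg (fun s => rpRaw l s b)
        (List.getD_append rows [row] "" t (Finset.mem_range.mp ht)).symm)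
    rw [hnew]
    refine Prod.ext ?_ ?_
    · simp
    · simp only [List.length_append, List.length_singleton]
      have hrng : List.range (rows.length + 1 + 1) = List.range (rows.length + 1) ++ [rows.length + 1] :=
        List.range_succ
      rw [hrng, List.map_append]
      congr 1
      · apply List.map_congr_left
        intro a ha
        apply List.map_congr_left
        intro b _
        exact (PmRaw_append l rows row a b (by simpa using Nat.lt_succ_iff.mp (List.mem_range.mp ha))).symm

lemma getD_pref (ls : List String) (a b : Nat) (ha : a ≤ ls.length) (hb : b ≤ ls.length) :
    PySem.List.pyGetD (PySem.List.pyGetD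
        ((List.range (ls.length + 1)).map (fun a =>
          (List.range (ls.length + 1)).map (fun b => PmRaw ls.length ls a b)))
        (a : Int) []) (b : Int) 0 = PmRaw ls.length ls a b := by
  rw [PySem.List.pyGetD_natCast, PySem.List.pyGetD_natCast,
      PySem.List.getD_map_range _ _ a _ (show a < ls.length + 1 by omega),
      PySem.List.getD_map_range _ _ b _ (show b < ls.length + 1 by omega)]

lemma Pm_diff (ls : List String) (r i b : Nat) (hb : b ≤ ls.length) :
    PmRaw ls.length ls (r + i) b - PmRaw ls.length ls r b
    = ∑ t ∈ Finset.range i, rpF (ls.getD (r + t) "") b := by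
  unfold PmRaw
  rw [Finset.sum_range_add]
  simp only [add_sub_cancel_left]
  exact Finset.sum_congr rfl (fun t _ => rpRaw_eq_rpF _ _ _ hb)

lemma blockB_eq (ls : List String) (i r c : Nat)
    (hr : r + i ≤ ls.length) (hc : c + i ≤ ls.length) :
    blockB ((List.range (ls.length + 1)).map (fun a =>
        (List.range (ls.length + 1)).map (fun b => PmRaw ls.length ls a b)))
      (r : Int) (c : Int) (i : Int) = vv ls i r c := by
  unfold blockB
  have h1 : (r : Int) + (i : Int) = ((r + i : Nat) : Int) := by push_cast; ring
  have h2 : (c : Int) + (i : Int) = ((c + i : Nat) : Int) := by push_cast; ring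
  rw [h1, h2]
  rw [getD_pref ls (r+i) (c+i) hr hc, getD_pref ls r (c+i) (by omega) hc,
      getD_pref ls (r+i) c hr (by omega), getD_pref ls r c (by omega) (by omega)]
  have e1 := Pm_diff ls r i (c+i) hc
  have e2 := Pm_diff ls r i c (by omega)
  unfold vv
  rw [Finset.sum_sub_distrib, ← e1, ← e2]
  ring

lemma set_update_append (t : List Int) : ∀ (s : PySem.Set Int),
    ∃ u, PySem.Set.update s t = s ++ u := by
  induction t with
  | nil => intro s; exact ⟨[], by simp [PySem.Set.update]⟩
  | cons z t ih =>
    intro s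
    have hstep : PySem.Set.update s (z :: t) = PySem.Set.update (PySem.Set.add s z) t := rfl
    rw [hstep]
    by_cases h : z ∈ s
    · obtain ⟨u, hu⟩ := ih s
      exact ⟨u, by rw [show PySem.Set.add s z = s by simp [PySem.Set.add, h]]; exact hu⟩
    · obtain ⟨u, hu⟩ := ih (s ++ [z])
      refine ⟨z :: u, ?_⟩
      rw [show PySem.Set.add s z = s ++ [z] by simp [PySem.Set.add, h], hu]
      simp

lemma set_update_len_one (t : List Int) : ∀ (y : Int),
    ((PySem.Set.update [y] t).length = 1 ↔ ∀ z ∈ t, z = y) := by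
  induction t with
  | nil => intro y; simp [PySem.Set.update]
  | cons z t ih =>
    intro y
    have hstep : PySem.Set.update [y] (z :: t) = PySem.Set.update (PySem.Set.add [y] z) t := rfl
    rw [hstep]
    by_cases h : z = y
    · subst h
      rw [show PySem.Set.add [z] z = [z] by simp [PySem.Set.add]]
      simp only [List.mem_cons]
      rw [ih z]
      constructor
      · intro hh w hw; rcases hw with rfl | hw; rfl; exact hh w hw
      · intro hh w hw; exact hh w (Or.inr hw)
    · rw [show PySem.Set.add [y] z = [y, z] by simp [PySem.Set.add, h]]
      obtain ⟨u, hu⟩ := set_update_append t [y, z]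
      rw [hu]
      constructor
      · intro hh; exact absurd hh (by simp)
      · intro hh; exact absurd (hh z (by simp)) h

lemma set_update_head (t : List Int) (y : Int) :
    PySem.List.pyGetD (PySem.Set.update [y] t) 0 0 = y := by
  obtain ⟨u, hu⟩ := set_update_append t [y]
  rw [hu]
  simp [PySem.List.pyGetD_ofNat']

lemma set_ofList_cons (y : Int) (t : List Int) :
    PySem.Set.ofList (y :: t) = PySem.Set.update [y] t := by
  rw [PySem.Set.ofList_eq_foldl]
  rfl

lemma nested_fold_set (R : List Int) (f : Int → Int → Int) :
    ∀ (s : PySem.Set Int),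
    R.foldl (fun c j => R.foldl (fun c k => PySem.Set.add c (f j k)) c) s
    = PySem.Set.update s (R.flatMap (fun j => R.map (f j))) := by
  have hrow : ∀ (j : Int) (s : PySem.Set Int),
      R.foldl (fun c k => PySem.Set.add c (f j k)) s = PySem.Set.update s (R.map (f j)) := by
    intro j s
    rw [show PySem.Set.update s (R.map (f j)) = (R.map (f j)).foldl PySem.Set.add s from rfl,
        List.foldl_map]
  have hgen : ∀ (g : Int → List Int) (J : List Int) (s : PySem.Set Int),
      J.foldl (fun c j => PySem.Set.update c (g j)) s = PySem.Set.update s (J.flatMap g) := by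
    intro g J
    induction J with
    | nil => intro s; simp [PySem.Set.update]
    | cons j J ih =>
      intro s
      rw [List.foldl_cons, ih, List.flatMap_cons,
        show ∀ xs ys (d : PySem.Set Int), PySem.Set.update d (xs ++ ys)
            = PySem.Set.update (PySem.Set.update d xs) ys from
          fun xs ys d => List.foldl_append]
  intro s
  exact (PySem.List.foldl_congr_mem R _ (fun c j => PySem.Set.update c (R.map (f j))) s
      (fun acc x _ => hrow x acc)).trans (hgen _ R s)

lemma findSome?_congr {α β : Type} (l : List α) (f g : α → Option β)
    (h : ∀ x ∈ l, f x = g x) : l.findSome? f = l.findSome? g := by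
  induction l with
  | nil => rfl
  | cons x t ih =>
    rw [List.findSome?_cons, List.findSome?_cons, h x (by simp)]
    cases g x with
    | some v => rfl
    | none => exact ih (fun y hy => h y (by simp [hy]))

lemma cnfold_fst (R : List Int) (g : Int → Int → Int) :
    (R.foldl (fun s j => R.foldl (fun s k => (PySem.Set.add s.1 (g j k), s.2 + 1)) s)
      ((PySem.Set.empty : PySem.Set Int), (0 : Int))).1
    = PySem.Set.ofList (R.flatMap (fun j => R.map (g j))) := by
  have h1 : ∀ (s : PySem.Set Int × Int), ∀ j ∈ R,
      R.foldl (fun s k => (PySem.Set.add s.1 (g j k), s.2 + 1)) s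
      = (R.foldl (fun c k => PySem.Set.add c (g j k)) s.1,
         R.foldl (fun n _ => n + (1 : Int)) s.2) := by
    intro s j _
    cases s with
    | mk a b =>
      exact PySem.List.foldl_prod_mk (fun c k => PySem.Set.add c (g j k))
        (fun n _ => n + (1 : Int)) R a b
  rw [PySem.List.foldl_congr_mem R _ _ _ h1,
      PySem.List.foldl_prod_mk (fun c j => R.foldl (fun c k => PySem.Set.add c (g j k)) c)
        (fun n j => R.foldl (fun n _ => n + (1 : Int)) n) R PySem.Set.empty 0]
  rw [show (PySem.Set.empty : PySem.Set Int) = ([] : PySem.Set Int) from rfl] at *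
  rw [nested_fold_set R g []]
  rfl

lemma set_len_one_iff (y : Int) (t : List Int) :
    (PySem.Set.len (PySem.Set.ofList (y :: t)) = 1) ↔ ∀ z ∈ y :: t, z = y := by
  rw [set_ofList_cons]
  have h := set_update_len_one t y
  rw [show PySem.Set.len (PySem.Set.update [y] t)
      = ((PySem.Set.update [y] t).length : Int) from rfl]
  constructor
  · intro hh z hz
    rcases List.mem_cons.mp hz with rfl | hz'
    · rfl
    · exact h.mp (by exact_mod_cast hh) z hz'
  · intro hh
    rw [h.mpr (fun z hz => hh z (List.mem_cons_of_mem _ hz))]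
    rfl

lemma set_head_val (y : Int) (t : List Int) :
    PySem.List.pyGetD (PySem.Set.ofList (y :: t)) 0 0 = y := by
  rw [set_ofList_cons]; exact set_update_head t y

-- ===== VERDICT (by name: the statement is the Claim_ definition above) =====
theorem solve_spec : Claim_equal_solve := by
  intro ls _
  unfold Spec_solve solve solve_alt
  simp only [pref_eq ls.length ls]
  apply findSome?_congr
  intro i hi
  rw [PySem.List.mem_pyRange_one] at hi
  obtain ⟨h1, h2⟩ := hi
  have hiN : i = ((i.toNat : Nat) : Int) := by omega
  rw [hiN] at h1 h2 ⊢
  generalize i.toNat = iN at *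
  clear hiN i
  have h1' : 1 ≤ iN := by exact_mod_cast h1
  have h2' : iN ≤ ls.length := by omega
  rw [cnfold_fst]
  set n := ls.length with hn
  set P := (List.range (n + 1)).map (fun a => (List.range (n + 1)).map (fun b => PmRaw n ls a b)) with hP
  set R := PySem.List.pyRange 0 ((n : Int) - (iN : Int) + 1) 1 with hR
  have hM : (0 : Int) < (n : Int) - (iN : Int) + 1 := by omega
  have hRcons : R = 0 :: PySem.List.pyRange 1 ((n : Int) - (iN : Int) + 1) 1 :=
    PySem.List.pyRange_one_cons hM
  have htex : ∃ t, R.flatMap (fun j => R.map (countA ls (iN : Int) j))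
      = countA ls (iN : Int) 0 0 :: t := by
    rw [hRcons, List.flatMap_cons, List.map_cons, List.cons_append]
    exact ⟨_, rfl⟩
  obtain ⟨t, ht⟩ := htex
  rw [ht]
  have hbridge : ∀ j ∈ R, ∀ k ∈ R, blockB P j k (iN : Int) = countA ls (iN : Int) j k := by
    intro j hj k hk
    rw [hR, PySem.List.mem_pyRange_one] at hj hk
    have hj' : j = ((j.toNat : Nat) : Int) := by omega
    have hk' : k = ((k.toNat : Nat) : Int) := by omega
    rw [hj', hk', hP, hn, countA_eq,
        blockB_eq ls iN j.toNat k.toNat (by omega) (by omega)]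
  have h00 : (0 : Int) ∈ R := by rw [hR, PySem.List.mem_pyRange_one]; omega
  have htarget : blockB P 0 0 (iN : Int) = countA ls (iN : Int) 0 0 := hbridge 0 h00 0 h00
  have hA : (PySem.Set.ofList (countA ls (iN : Int) 0 0 :: t)).len = 1
      ↔ ∀ j ∈ R, ∀ k ∈ R, countA ls (iN : Int) j k = countA ls (iN : Int) 0 0 := by
    rw [set_len_one_iff, ← ht]
    constructor
    · intro hz j hj k hk
      exact hz _ (List.mem_flatMap.mpr ⟨j, hj, List.mem_map.mpr ⟨k, hk, rfl⟩⟩)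
    · intro hz z hzv
      obtain ⟨j, hj, hm⟩ := List.mem_flatMap.mp hzv
      obtain ⟨k, hk, rfl⟩ := List.mem_map.mp hm
      exact hz j hj k hk
  have hB : (R.all fun r => R.all fun c =>
        blockB P r c (iN : Int) == blockB P 0 0 (iN : Int)) = true
      ↔ ∀ j ∈ R, ∀ k ∈ R, countA ls (iN : Int) j k = countA ls (iN : Int) 0 0 := by
    simp only [List.all_eq_true, beq_iff_eq, htarget]
    constructor
    · intro hz j hj k hk; rw [← hbridge j hj k hk]; exact hz j hj k hk
    · intro hz j hj k hk; rw [hbridge j hj k hk]; exact hz j hj k hk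
  by_cases hc : ∀ j ∈ R, ∀ k ∈ R, countA ls (iN : Int) j k = countA ls (iN : Int) 0 0
  · rw [if_pos (hA.mpr hc), if_pos (hB.mpr hc), set_head_val, htarget]
  · rw [if_neg (fun hh => hc (hA.mp hh)), if_neg (fun hh => hc (hB.mp hh))]
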